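-- pv_equiv track=rewrite | github.com/hadamrd/pydofus2 | pydofus2/com/ankamagames/dofus/logic/game/fight/types/castSpellManager/SpellManager.py | splitMasks
-- ===== SOURCE A (Python) =====
-- def splitMasks(param: str) -> list:
--     result = []
--     i = 0
--     while i < len(param):
--         while i < len(param) and (param[i] == " " or param[i] == ","):
--             i += 1
--         start = i
--         while i < len(param) and param[i] != ",":
--             i += 1
--         if i != start:
--             result.append(param[start:i])
--     return result
-- ===== SOURCE B (Python) =====
-- def splitMasks(param: str) -> list:
--     tokens = [piece.lstrip(' ') for piece in param.split(',')]
--     return [t for t in tokens if t]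
-- ===== Notes on version B (the rewrite author's own statement) =====
-- stated objective: simpler
-- what changed: Replaces the manual index-based character scan (three nested while loops over positions) with a token-level comma split followed by stripping leading spaces from each piece and keeping the non-empty ones.
import Mathlib
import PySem

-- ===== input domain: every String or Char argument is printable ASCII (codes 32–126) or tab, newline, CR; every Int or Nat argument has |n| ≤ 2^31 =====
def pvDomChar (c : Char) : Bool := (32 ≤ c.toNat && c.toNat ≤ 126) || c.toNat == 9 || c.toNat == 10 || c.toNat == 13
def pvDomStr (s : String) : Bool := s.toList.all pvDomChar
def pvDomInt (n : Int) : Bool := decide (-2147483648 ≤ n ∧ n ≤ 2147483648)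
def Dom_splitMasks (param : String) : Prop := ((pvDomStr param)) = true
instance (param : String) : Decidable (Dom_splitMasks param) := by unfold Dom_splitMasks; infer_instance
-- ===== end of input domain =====

-- B replaces A's manual index-based scan with split-on-comma + lstrip-space + drop empties (objective: simpler).

-- ===== PORT A =====
-- inner skip loop: `while i < len(param) and (param[i] == " " or param[i] == ","): i += 1`
-- (the index i is represented by the remaining suffix of the character list)
def pvSkipA : List Char → List Char
  | [] => []
  | c :: rest => if c = ' ' ∨ c = ',' then pvSkipA rest else c :: rest

-- inner scan loop: `while i < len(param) and param[i] != ",": i += 1`; returns (param[start:i], rest)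
def pvScanA : List Char → List Char × List Char
  | [] => ([], [])
  | c :: rest =>
    if c ≠ ',' then
      let p := pvScanA rest
      (c :: p.1, p.2)
    else ([], c :: rest)

-- lemmas the port needs for termination (cited in decreasing_by)
theorem pvSkipA_length (l : List Char) : (pvSkipA l).length ≤ l.length := by
  induction l with
  | nil => simp [pvSkipA]
  | cons c rest ih =>
    simp only [pvSkipA]
    split
    · exact Nat.le_trans ih (Nat.le_succ _)
    · simp

theorem pvScanA_spec (l : List Char) :
    pvScanA l = (l.takeWhile (fun c => c ≠ ','), l.dropWhile (fun c => c ≠ ',')) := by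
  induction l with
  | nil => simp [pvScanA]
  | cons c rest ih =>
    simp only [pvScanA, List.takeWhile, List.dropWhile]
    by_cases hc : c = ','
    · simp [hc]
    · simp [hc, ih]

theorem pvSkipA_head (l : List Char) :
    pvSkipA l = [] ∨ ∃ c r, pvSkipA l = c :: r ∧ c ≠ ' ' ∧ c ≠ ',' := by
  induction l with
  | nil => left; rfl
  | cons c rest ih =>
    by_cases h : c = ' ' ∨ c = ','
    · rw [show pvSkipA (c :: rest) = pvSkipA rest by simp [pvSkipA, h]]; exact ih
    · push_neg at h
      right; exact ⟨c, rest, by simp [pvSkipA, h.1, h.2], h.1, h.2⟩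

theorem pvScan_skip_lt (cs : List Char) (hcs : cs ≠ []) :
    (pvScanA (pvSkipA cs)).2.length < cs.length := by
  rw [pvScanA_spec]
  rcases pvSkipA_head cs with h | ⟨c, r, h, _, hc⟩
  · rw [h]; simp [List.length_pos_iff.mpr hcs]
  · rw [h]
    have hlen : (c :: r).length ≤ cs.length := h ▸ pvSkipA_length cs
    rw [List.dropWhile_cons, if_pos (by simp [hc])]
    calc (r.dropWhile (fun c => c ≠ ',')).length ≤ r.length := List.length_dropWhile_le _ _
      _ < (c :: r).length := by simp
      _ ≤ cs.length := hlen

-- outer loop: `while i < len(param): …`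
def splitMasksGo (cs : List Char) : List String :=
  if hcs : cs = [] then []
  else
    let cs1 := pvSkipA cs
    let p := pvScanA cs1
    if p.1 = [] then splitMasksGo p.2        -- `if i != start` fails: nothing appended
    else String.mk p.1 :: splitMasksGo p.2   -- `result.append(param[start:i])`
termination_by cs.length
decreasing_by
  · exact pvScan_skip_lt cs hcs
  · exact pvScan_skip_lt cs hcs

def splitMasks (param : String) : List String := splitMasksGo param.toList

-- ===== PORT B =====
-- `param.split(',')` → PySem.Chars.splitOn (sep ≠ ""); `piece.lstrip(' ')` → dropWhile (= ' ')
-- (exact: lstrip(' ') removes only leading space characters); `if t` keeps non-empty tokens.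
def splitMasks_alt (param : String) : List String :=
  let tokens := (PySem.Chars.splitOn param.toList [',']).map
    (fun piece => String.mk (piece.dropWhile (fun c => c = ' ')))
  tokens.filter (fun t => !t.isEmpty)

-- ===== PRECONDITION & SPEC =====
def Spec_splitMasks (param : String) (out : List String) : Prop := out = splitMasks_alt param
instance (param : String) (out : List String) : Decidable (Spec_splitMasks param out) := by unfold Spec_splitMasks; infer_instance

-- ===== CLAIM (what is proved, stated in full; the proofs are below) =====
def Claim_equal_splitMasks : Prop := ∀ (param : String), Dom_splitMasks param → Spec_splitMasks param (splitMasks param)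

-- ===== LEMMAS AND PROOFS =====

-- a simple structural recursion equal to PySem.Chars.splitOn · [',']
def mySplit : List Char → List (List Char)
  | [] => [[]]
  | c :: rest => if c = ',' then [] :: mySplit rest else (mySplit rest).modifyHead (c :: ·)

theorem modifyHead_id' {α : Type} (L : List α) : List.modifyHead (fun x => x) L = L := by
  cases L <;> rfl

theorem go_step_comma (fuel : Nat) (rest cur : List Char) (hacc : List (List Char)) :
    PySem.Chars.splitOn.go [','] (fuel+1) (',' :: rest) cur hacc =
      PySem.Chars.splitOn.go [','] fuel rest [] (cur.reverse :: hacc) := by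
  simp [PySem.Chars.splitOn.go, List.isPrefixOf]

theorem go_step_other (fuel : Nat) (c : Char) (rest cur : List Char) (hacc : List (List Char))
    (hc : c ≠ ',') :
    PySem.Chars.splitOn.go [','] (fuel+1) (c :: rest) cur hacc =
      PySem.Chars.splitOn.go [','] fuel rest (c :: cur) hacc := by
  simp only [PySem.Chars.splitOn.go, List.isPrefixOf, List.isPrefixOf_nil_left, Bool.and_true,
    List.drop_succ_cons, List.drop_zero]
  rw [if_neg (by simp [Ne.symm hc])]

theorem go_eq (fuel : Nat) : ∀ (l cur acc : List Char) (hacc : List (List Char)),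
    l.length < fuel →
    PySem.Chars.splitOn.go [','] fuel l cur hacc =
      hacc.reverse ++ (mySplit l).modifyHead (cur.reverse ++ ·) := by
  induction fuel with
  | zero => intro l cur acc hacc h; omega
  | succ fuel ih =>
    intro l cur acc hacc h
    match l with
    | [] => simp [PySem.Chars.splitOn.go, mySplit]
    | c :: rest =>
      by_cases hc : c = ','
      · subst hc
        rw [go_step_comma fuel rest cur hacc,
            ih rest [] [] (cur.reverse :: hacc) (by simpa using Nat.lt_of_succ_lt_succ h)]
        simp [mySplit, modifyHead_id']
      · rw [go_step_other fuel c rest cur hacc hc,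
            ih rest (c :: cur) [] hacc (by simpa using Nat.lt_of_succ_lt_succ h)]
        simp only [mySplit, if_neg hc, List.modifyHead_modifyHead]
        congr 2
        funext x
        simp

theorem splitOn_eq (l : List Char) : PySem.Chars.splitOn l [','] = mySplit l := by
  unfold PySem.Chars.splitOn
  rw [go_eq (l.length + 1) l [] [] [] (Nat.lt_succ_self _)]
  simp [modifyHead_id']

-- B's value at the char-list level
def pvB (l : List Char) : List String :=
  (((mySplit l).map (fun p => p.dropWhile (fun c => c = ' '))).filter (fun t => t ≠ [])).map String.mk

theorem mySplit_eq (l : List Char) :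
    mySplit l = l.takeWhile (fun c => c ≠ ',') ::
      (match l.dropWhile (fun c => c ≠ ',') with
       | [] => []
       | _ :: r => mySplit r) := by
  induction l with
  | nil => simp [mySplit]
  | cons c rest ih =>
    by_cases hc : c = ','
    · subst hc; simp [mySplit, List.takeWhile, List.dropWhile]
    · simp only [mySplit, if_neg hc, List.takeWhile, List.dropWhile, hc]
      rw [ih]
      simp [hc]

theorem pvB_comma (l : List Char) : pvB (',' :: l) = pvB l := by
  simp [pvB, mySplit]

theorem pvB_space (l : List Char) : pvB (' ' :: l) = pvB l := by
  have h := mySplit_eq l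
  simp only [pvB, mySplit, if_neg (by decide : ¬ (' ' = ','))]
  rw [h]
  simp [List.modifyHead, List.dropWhile]

theorem pvB_nil : pvB [] = [] := by simp [pvB, mySplit]

theorem dropWhile_head_not {α : Type} (p : α → Bool) :
    ∀ (l : List α) (e : α) (r : List α), l.dropWhile p = e :: r → p e = false := by
  intro l
  induction l with
  | nil => intro e r h; simp [List.dropWhile] at h
  | cons a t ih =>
    intro e r h
    by_cases hp : p a = true
    · rw [List.dropWhile_cons_of_pos hp] at h; exact ih e r h
    · rw [List.dropWhile_cons_of_neg (by simpa using hp)] at h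
      cases h
      simpa using hp

theorem main_eq (l : List Char) : splitMasksGo l = pvB l := by
  induction hn : l.length using Nat.strong_induction_on generalizing l with
  | _ n ih =>
  subst hn
  match l with
  | [] => rw [pvB_nil]; simp [splitMasksGo]
  | c :: rest =>
    by_cases hd : c = ' ' ∨ c = ','
    · -- delimiter head: A skips it, B drops an empty/space-stripped piece
      have hA : splitMasksGo (c :: rest) = splitMasksGo rest := by
        match rest with
        | [] =>
          have h0 : splitMasksGo ([] : List Char) = [] := by simp [splitMasksGo]
          rw [splitMasksGo, splitMasksGo]
          simp [pvSkipA, hd, pvScanA, h0]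
        | d :: r2 =>
          rw [splitMasksGo, splitMasksGo]
          simp only [List.cons_ne_nil, dite_false, reduceDIte]
          rw [show pvSkipA (c :: d :: r2) = pvSkipA (d :: r2) by simp [pvSkipA, hd]]
      have hB : pvB (c :: rest) = pvB rest := by
        rcases hd with h | h <;> subst h
        · exact pvB_space rest
        · exact pvB_comma rest
      rw [hA, hB]
      exact ih rest.length (by simp) rest rfl
    · push_neg at hd
      have hskip : pvSkipA (c :: rest) = c :: rest := by
        simp [pvSkipA, hd.1, hd.2]
      have hscan := pvScanA_spec (c :: rest)
      have hc' : (fun x : Char => decide (x ≠ ',')) c = true := by simp [hd.2]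
      rw [splitMasksGo, dif_neg (List.cons_ne_nil c rest)]
      dsimp only
      rw [hskip, hscan]
      dsimp only
      rw [show List.takeWhile (fun c => decide (c ≠ ',')) (c :: rest) =
            c :: List.takeWhile (fun c => decide (c ≠ ',')) rest from
          List.takeWhile_cons_of_pos hc',
        show List.dropWhile (fun c => decide (c ≠ ',')) (c :: rest) =
            List.dropWhile (fun c => decide (c ≠ ',')) rest from
          List.dropWhile_cons_of_pos hc',
        if_neg (List.cons_ne_nil _ _)]
      -- B side
      have hms := mySplit_eq (c :: rest)
      rw [show List.takeWhile (fun c => decide (c ≠ ',')) (c :: rest) =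
            c :: List.takeWhile (fun c => decide (c ≠ ',')) rest from
          List.takeWhile_cons_of_pos hc',
        show List.dropWhile (fun c => decide (c ≠ ',')) (c :: rest) =
            List.dropWhile (fun c => decide (c ≠ ',')) rest from
          List.dropWhile_cons_of_pos hc'] at hms
      have hBsplit : pvB (c :: rest) =
          String.mk (c :: rest.takeWhile (fun x => x ≠ ',')) ::
            (match rest.dropWhile (fun x => x ≠ ',') with
             | [] => []
             | _ :: r => pvB r) := by
        unfold pvB
        rw [hms]
        have hstrip : (c :: rest.takeWhile (fun x => x ≠ ',')).dropWhile (fun x => x = ' ') =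
            c :: rest.takeWhile (fun x => x ≠ ',') := by
          rw [List.dropWhile_cons_of_neg (by simp [hd.1])]
        match hdw : rest.dropWhile (fun x => x ≠ ',') with
        | [] =>
          simp only [List.map, List.filter, hstrip]
          simp [pvB]
        | e :: r2 =>
          simp only [List.map_cons, List.filter_cons, hstrip]
          simp [pvB]
      rw [hBsplit]
      congr 1
      cases hdw : rest.dropWhile (fun x => x ≠ ',') with
      | nil => simp [splitMasksGo]
      | cons e r2 =>
        have he : e = ',' := by
          have := dropWhile_head_not (fun x => decide (x ≠ ',')) rest e r2 hdw
          simpa using this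
        have hlen : (e :: r2).length < (c :: rest).length := by
          have := List.length_dropWhile_le (p := fun x => decide (x ≠ ',')) rest
          rw [hdw] at this
          simp at this ⊢
          omega
        have hrec := ih (e :: r2).length (by simpa using hlen) (e :: r2) rfl
        rw [hrec, he, pvB_comma]

theorem filter_mk (L : List (List Char)) :
    (L.map String.mk).filter (fun t => !t.isEmpty) = (L.filter (fun t => t ≠ [])).map String.mk := by
  induction L with
  | nil => rfl
  | cons p rest ih =>
    by_cases hp : p = []
    · subst hp
      have h0 : (!(String.mk ([] : List Char)).isEmpty) = false := by decide
      simp [h0, ih]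
    · have h1 : (!(String.mk p).isEmpty) = true := by
        rw [Bool.not_eq_true', Bool.eq_false_iff]
        intro h
        have h3 : (String.mk p).toList = p := String.toList_ofList
        rw [String.isEmpty_iff.mp h] at h3
        simp at h3
        exact hp h3
      simp [List.filter_cons, h1, hp, ih]

-- ===== VERDICT (by name: the statement is the Claim_ definition above) =====
theorem splitMasks_spec : Claim_equal_splitMasks := by
  intro param _
  show splitMasks param = splitMasks_alt param
  unfold splitMasks splitMasks_alt
  rw [main_eq, splitOn_eq]
  unfold pvB
  dsimp only
  have hcomp : (fun piece : List Char => String.mk (piece.dropWhile (fun c => c = ' ')))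
      = String.mk ∘ (fun p : List Char => p.dropWhile (fun c => c = ' ')) := rfl
  rw [hcomp, ← List.map_map, filter_mk]
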